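-- pv_equiv track=rewrite | github.com/KPH3802/congress-trade-tracker | analyzer.py | is_leadership_member
-- ===== SOURCE A (Python) =====
-- CONGRESSIONAL_LEADERSHIP = {
--     # House Leadership
--     'Mike Johnson': {'position': 'Speaker of the House', 'chamber': 'House', 'party': 'R'},
--     'Steve Scalise': {'position': 'House Majority Leader', 'chamber': 'House', 'party': 'R'},
--     'Tom Emmer': {'position': 'House Majority Whip', 'chamber': 'House', 'party': 'R'},
--     'Hakeem Jeffries': {'position': 'House Minority Leader', 'chamber': 'House', 'party': 'D'},
--     'Katherine Clark': {'position': 'House Minority Whip', 'chamber': 'House', 'party': 'D'},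
--     'Pete Aguilar': {'position': 'House Democratic Caucus Chair', 'chamber': 'House', 'party': 'D'},
--
--     # Senate Leadership
--     'John Thune': {'position': 'Senate Majority Leader', 'chamber': 'Senate', 'party': 'R'},
--     'Chuck Schumer': {'position': 'Senate Minority Leader', 'chamber': 'Senate', 'party': 'D'},
--     'John Barrasso': {'position': 'Senate Majority Whip', 'chamber': 'Senate', 'party': 'R'},
--     'Dick Durbin': {'position': 'Senate Minority Whip', 'chamber': 'Senate', 'party': 'D'},
--     'Shelley Moore Capito': {'position': 'Senate Republican Conference Chair', 'chamber': 'Senate', 'party': 'R'},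
--
--     # Key Committee Chairs (often have significant market-moving info)
--     'Jason Smith': {'position': 'House Ways & Means Chair', 'chamber': 'House', 'party': 'R'},
--     'Patrick McHenry': {'position': 'House Financial Services Chair', 'chamber': 'House', 'party': 'R'},
--     'Mike Crapo': {'position': 'Senate Finance Chair', 'chamber': 'Senate', 'party': 'R'},
--     'Tim Scott': {'position': 'Senate Banking Chair', 'chamber': 'Senate', 'party': 'R'},
-- }
--
-- LEADERSHIP_NAME_VARIANTS = {
--     'michael johnson': 'Mike Johnson',
--     'steven scalise': 'Steve Scalise',
--     'thomas emmer': 'Tom Emmer',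
--     'katherine m clark': 'Katherine Clark',
--     'katherine m. clark': 'Katherine Clark',
--     'charles schumer': 'Chuck Schumer',
--     'charles e schumer': 'Chuck Schumer',
--     'richard durbin': 'Dick Durbin',
--     'richard j durbin': 'Dick Durbin',
--     'shelley capito': 'Shelley Moore Capito',
-- }
--
-- def normalize_name(name):
--     """Normalize a politician name for comparison."""
--     if not name:
--         return ''
--     # Remove titles, extra spaces, convert to lowercase
--     normalized = name.lower().strip()
--     # Remove common prefixes
--     for prefix in ['rep.', 'rep ', 'sen.', 'sen ', 'representative ', 'senator ']:
--         if normalized.startswith(prefix):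
--             normalized = normalized[len(prefix):]
--     return normalized.strip()
--
-- def is_leadership_member(politician_name):
--     """
--     Check if a politician is in congressional leadership.
--     Returns (is_leader: bool, leadership_info: dict or None)
--     """
--     if not politician_name:
--         return False, None
--
--     normalized = normalize_name(politician_name)
--
--     # Check direct match first
--     for leader_name, info in CONGRESSIONAL_LEADERSHIP.items():
--         if normalize_name(leader_name) == normalized:
--             return True, {'name': leader_name, **info}
--
--     # Check name variants
--     if normalized in LEADERSHIP_NAME_VARIANTS:
--         canonical_name = LEADERSHIP_NAME_VARIANTS[normalized]
--         if canonical_name in CONGRESSIONAL_LEADERSHIP: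
--             return True, {'name': canonical_name, **CONGRESSIONAL_LEADERSHIP[canonical_name]}
--
--     # Partial match (last name + first initial)
--     for leader_name, info in CONGRESSIONAL_LEADERSHIP.items():
--         leader_parts = leader_name.lower().split()
--         name_parts = normalized.split()
--         if len(leader_parts) >= 2 and len(name_parts) >= 2:
--             # Match last name and first letter of first name
--             if leader_parts[-1] == name_parts[-1] and leader_parts[0][0] == name_parts[0][0]:
--                 return True, {'name': leader_name, **info}
--
--     return False, None
-- ===== SOURCE B (Python) =====
-- CONGRESSIONAL_LEADERSHIP = {
--     # House Leadership
--     'Mike Johnson': {'position': 'Speaker of the House', 'chamber': 'House', 'party': 'R'},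
--     'Steve Scalise': {'position': 'House Majority Leader', 'chamber': 'House', 'party': 'R'},
--     'Tom Emmer': {'position': 'House Majority Whip', 'chamber': 'House', 'party': 'R'},
--     'Hakeem Jeffries': {'position': 'House Minority Leader', 'chamber': 'House', 'party': 'D'},
--     'Katherine Clark': {'position': 'House Minority Whip', 'chamber': 'House', 'party': 'D'},
--     'Pete Aguilar': {'position': 'House Democratic Caucus Chair', 'chamber': 'House', 'party': 'D'},
--
--     # Senate Leadership
--     'John Thune': {'position': 'Senate Majority Leader', 'chamber': 'Senate', 'party': 'R'},
--     'Chuck Schumer': {'position': 'Senate Minority Leader', 'chamber': 'Senate', 'party': 'D'},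
--     'John Barrasso': {'position': 'Senate Majority Whip', 'chamber': 'Senate', 'party': 'R'},
--     'Dick Durbin': {'position': 'Senate Minority Whip', 'chamber': 'Senate', 'party': 'D'},
--     'Shelley Moore Capito': {'position': 'Senate Republican Conference Chair', 'chamber': 'Senate', 'party': 'R'},
--
--     # Key Committee Chairs (often have significant market-moving info)
--     'Jason Smith': {'position': 'House Ways & Means Chair', 'chamber': 'House', 'party': 'R'},
--     'Patrick McHenry': {'position': 'House Financial Services Chair', 'chamber': 'House', 'party': 'R'},
--     'Mike Crapo': {'position': 'Senate Finance Chair', 'chamber': 'Senate', 'party': 'R'},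
--     'Tim Scott': {'position': 'Senate Banking Chair', 'chamber': 'Senate', 'party': 'R'},
-- }
--
-- LEADERSHIP_NAME_VARIANTS = {
--     'michael johnson': 'Mike Johnson',
--     'steven scalise': 'Steve Scalise',
--     'thomas emmer': 'Tom Emmer',
--     'katherine m clark': 'Katherine Clark',
--     'katherine m. clark': 'Katherine Clark',
--     'charles schumer': 'Chuck Schumer',
--     'charles e schumer': 'Chuck Schumer',
--     'richard durbin': 'Dick Durbin',
--     'richard j durbin': 'Dick Durbin',
--     'shelley capito': 'Shelley Moore Capito',
-- }
--
-- def normalize_name(name):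
--     """Normalize a politician name for comparison."""
--     if not name:
--         return ''
--     # Remove titles, extra spaces, convert to lowercase
--     normalized = name.lower().strip()
--     # Remove common prefixes
--     for prefix in ['rep.', 'rep ', 'sen.', 'sen ', 'representative ', 'senator ']:
--         if normalized.startswith(prefix):
--             normalized = normalized[len(prefix):]
--     return normalized.strip()
--
--
-- def _build_indexes():
--     direct = {}
--     variant = {}
--     partial = {}
--     for leader, info in CONGRESSIONAL_LEADERSHIP.items():
--         entry = {'name': leader, **info}
--         direct.setdefault(normalize_name(leader), entry)
--         parts = leader.lower().split()
--         if len(parts) >= 2: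
--             partial.setdefault((parts[-1], parts[0][0]), entry)
--     for variant_name, canonical in LEADERSHIP_NAME_VARIANTS.items():
--         if canonical in CONGRESSIONAL_LEADERSHIP:
--             variant.setdefault(variant_name, {'name': canonical, **CONGRESSIONAL_LEADERSHIP[canonical]})
--     return direct, variant, partial
--
--
-- _DIRECT, _VARIANT, _PARTIAL = _build_indexes()
--
--
-- def is_leadership_member(politician_name):
--     """Index-based lookup: same result as the scanning version, O(1) per call."""
--     if not politician_name:
--         return False, None
--     normalized = normalize_name(politician_name)
--     hit = _DIRECT.get(normalized)
--     if hit is None: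
--         hit = _VARIANT.get(normalized)
--     if hit is None:
--         parts = normalized.split()
--         if len(parts) >= 2:
--             hit = _PARTIAL.get((parts[-1], parts[0][0]))
--     if hit is None:
--         return False, None
--     return True, dict(hit)
-- ===== Notes on version B (the rewrite author's own statement) =====
-- stated objective: faster
-- what changed: Replaces A's two per-call scans over the leadership table (each re-normalizing / re-splitting every leader name) by three lookup tables built once at import time (direct normalized name, variant name, (last name, first initial)), so each call does one normalization plus at most three O(1) dict lookups.
import Mathlib
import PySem

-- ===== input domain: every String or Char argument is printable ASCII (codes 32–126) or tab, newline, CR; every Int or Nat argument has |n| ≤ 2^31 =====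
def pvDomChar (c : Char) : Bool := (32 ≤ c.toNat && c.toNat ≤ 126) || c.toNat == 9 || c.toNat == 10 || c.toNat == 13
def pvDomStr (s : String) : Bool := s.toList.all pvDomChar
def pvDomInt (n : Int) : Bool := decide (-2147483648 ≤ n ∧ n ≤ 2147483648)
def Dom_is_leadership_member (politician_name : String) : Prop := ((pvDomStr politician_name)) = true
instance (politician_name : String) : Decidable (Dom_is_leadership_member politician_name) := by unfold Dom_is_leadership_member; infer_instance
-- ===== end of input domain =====

-- B replaces A's two per-call scans over the leadership table by lookup tables built once; return value proved equal.

-- ===== PORT A =====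

-- CONGRESSIONAL_LEADERSHIP (dict of dicts → association list, insertion order)
def leadershipTable : List (String × List (String × String)) := [
  ("Mike Johnson", [("position", "Speaker of the House"), ("chamber", "House"), ("party", "R")]),
  ("Steve Scalise", [("position", "House Majority Leader"), ("chamber", "House"), ("party", "R")]),
  ("Tom Emmer", [("position", "House Majority Whip"), ("chamber", "House"), ("party", "R")]),
  ("Hakeem Jeffries", [("position", "House Minority Leader"), ("chamber", "House"), ("party", "D")]),
  ("Katherine Clark", [("position", "House Minority Whip"), ("chamber", "House"), ("party", "D")]),
  ("Pete Aguilar", [("position", "House Democratic Caucus Chair"), ("chamber", "House"), ("party", "D")]),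
  ("John Thune", [("position", "Senate Majority Leader"), ("chamber", "Senate"), ("party", "R")]),
  ("Chuck Schumer", [("position", "Senate Minority Leader"), ("chamber", "Senate"), ("party", "D")]),
  ("John Barrasso", [("position", "Senate Majority Whip"), ("chamber", "Senate"), ("party", "R")]),
  ("Dick Durbin", [("position", "Senate Minority Whip"), ("chamber", "Senate"), ("party", "D")]),
  ("Shelley Moore Capito", [("position", "Senate Republican Conference Chair"), ("chamber", "Senate"), ("party", "R")]),
  ("Jason Smith", [("position", "House Ways & Means Chair"), ("chamber", "House"), ("party", "R")]),
  ("Patrick McHenry", [("position", "House Financial Services Chair"), ("chamber", "House"), ("party", "R")]),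
  ("Mike Crapo", [("position", "Senate Finance Chair"), ("chamber", "Senate"), ("party", "R")]),
  ("Tim Scott", [("position", "Senate Banking Chair"), ("chamber", "Senate"), ("party", "R")])]

-- LEADERSHIP_NAME_VARIANTS
def variantTable : List (String × String) := [
  ("michael johnson", "Mike Johnson"),
  ("steven scalise", "Steve Scalise"),
  ("thomas emmer", "Tom Emmer"),
  ("katherine m clark", "Katherine Clark"),
  ("katherine m. clark", "Katherine Clark"),
  ("charles schumer", "Chuck Schumer"),
  ("charles e schumer", "Chuck Schumer"),
  ("richard durbin", "Dick Durbin"),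
  ("richard j durbin", "Dick Durbin"),
  ("shelley capito", "Shelley Moore Capito")]

-- normalize_name (shared module helper, used verbatim by both A and B)
def normalizeName (name : String) : String :=
  if name == "" then ""
  else
    let normalized := PySem.Str.strip (PySem.Str.lower name)
    let normalized := ["rep.", "rep ", "sen.", "sen ", "representative ", "senator "].foldl
      (fun nm pre => if PySem.Str.startswith nm pre
                     then PySem.Str.slice nm (some (PySem.Str.len pre)) none
                     else nm) normalized
    PySem.Str.strip normalized

-- A's first loop: scan for a leader whose normalized name equals `normalized`
def aDirectFind (n : String) : List (String × List (String × String)) → Option (List (String × String))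
  | [] => none
  | (leader, info) :: rest =>
    if normalizeName leader == n then some (("name", leader) :: info) else aDirectFind n rest

-- A's second loop: partial match on (last name, first initial); indexing is guarded by the length test
def aPartialFind (n : String) : List (String × List (String × String)) → Option (List (String × String))
  | [] => none
  | (leader, info) :: rest =>
    let lp := PySem.Str.split₀ (PySem.Str.lower leader)
    let np := PySem.Str.split₀ n
    if 2 ≤ lp.length ∧ 2 ≤ np.length then
      if PySem.List.pyGetD lp (-1) "" == PySem.List.pyGetD np (-1) ""
         && PySem.Str.pyGet? (PySem.List.pyGetD lp 0 "") 0 == PySem.Str.pyGet? (PySem.List.pyGetD np 0 "") 0 then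
        some (("name", leader) :: info)
      else aPartialFind n rest
    else aPartialFind n rest

def is_leadership_member (politician_name : String) : Bool × (Option (List (String × String))) :=
  if politician_name == "" then (false, none)
  else
    let normalized := normalizeName politician_name
    match aDirectFind normalized leadershipTable with
    | some r => (true, some r)
    | none =>
      -- 'normalized in LEADERSHIP_NAME_VARIANTS' then indexing; 'canonical in CONGRESSIONAL_LEADERSHIP'
      -- then indexing: contains = (get? …).isSome, so one match per dict is exact
      match (PySem.Dict.mk variantTable).get? normalized with
      | some canonical =>
        match (PySem.Dict.mk leadershipTable).get? canonical with
        | some info => (true, some (("name", canonical) :: info))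
        | none =>
          match aPartialFind normalized leadershipTable with
          | some r => (true, some r)
          | none => (false, none)
      | none =>
        match aPartialFind normalized leadershipTable with
        | some r => (true, some r)
        | none => (false, none)

-- ===== PORT B =====

-- _DIRECT: normalize_name(leader) -> {'name': leader, **info}, first leader wins (setdefault)
def directIdx : PySem.Dict String (List (String × String)) :=
  leadershipTable.foldl
    (fun d p => d.setdefault (normalizeName p.1) (("name", p.1) :: p.2)) (PySem.Dict.mk [])

-- _VARIANT: variant -> {'name': canonical, **info} for variants whose canonical name is in the table
def variantIdx : PySem.Dict String (List (String × String)) :=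
  variantTable.foldl
    (fun d p =>
      match (PySem.Dict.mk leadershipTable).get? p.2 with
      | some info => d.setdefault p.1 (("name", p.2) :: info)
      | none => d) (PySem.Dict.mk [])

-- _PARTIAL: (last name, first initial) -> {'name': leader, **info}, first leader wins
def partialIdx : PySem.Dict (String × Option Char) (List (String × String)) :=
  leadershipTable.foldl
    (fun d p =>
      let parts := PySem.Str.split₀ (PySem.Str.lower p.1)
      if 2 ≤ parts.length then
        d.setdefault (PySem.List.pyGetD parts (-1) "", PySem.Str.pyGet? (PySem.List.pyGetD parts 0 "") 0)
          (("name", p.1) :: p.2)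
      else d) (PySem.Dict.mk [])

def is_leadership_member_alt (politician_name : String) : Bool × (Option (List (String × String))) :=
  if politician_name == "" then (false, none)
  else
    let n := normalizeName politician_name
    let hit := directIdx.get? n
    let hit := match hit with
      | some _ => hit
      | none => variantIdx.get? n
    let hit := match hit with
      | some _ => hit
      | none =>
        let parts := PySem.Str.split₀ n
        if 2 ≤ parts.length then
          partialIdx.get? (PySem.List.pyGetD parts (-1) "", PySem.Str.pyGet? (PySem.List.pyGetD parts 0 "") 0)
        else none
    match hit with
    | some r => (true, some r)
    | none => (false, none)

-- ===== PRECONDITION & SPEC =====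
def Spec_is_leadership_member (politician_name : String) (out : Bool × (Option (List (String × String)))) : Prop := out = is_leadership_member_alt politician_name
instance (politician_name : String) (out : Bool × (Option (List (String × String)))) : Decidable (Spec_is_leadership_member politician_name out) := by unfold Spec_is_leadership_member; infer_instance

-- ===== CLAIM (what is proved, stated in full; the proofs are below) =====
def Claim_equal_is_leadership_member : Prop := ∀ (politician_name : String), Dom_is_leadership_member politician_name → Spec_is_leadership_member politician_name (is_leadership_member politician_name)

-- ===== LEMMAS AND PROOFS =====

-- A's variant phase, rephrased as the scan the variant index build performs
def aVariantFind (n : String) : List (String × String) → Option (List (String × String))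
  | [] => none
  | (v, c) :: rest =>
    match (PySem.Dict.mk leadershipTable).get? c with
    | some info => if v == n then some (("name", c) :: info) else aVariantFind n rest
    | none => aVariantFind n rest

-- A's partial phase keyed by an already-extracted (last name, first initial)
def aPartialFindKey (key : String × Option Char) : List (String × List (String × String)) → Option (List (String × String))
  | [] => none
  | (leader, info) :: rest =>
    let lp := PySem.Str.split₀ (PySem.Str.lower leader)
    if 2 ≤ lp.length then
      if (PySem.List.pyGetD lp (-1) "", PySem.Str.pyGet? (PySem.List.pyGetD lp 0 "") 0) == key then
        some (("name", leader) :: info)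
      else aPartialFindKey key rest
    else aPartialFindKey key rest

theorem direct_inv (L : List (String × List (String × String)))
    (d : PySem.Dict String (List (String × String))) (n : String) :
    (L.foldl (fun d p => d.setdefault (normalizeName p.1) (("name", p.1) :: p.2)) d).get? n
      = (d.get? n).or (aDirectFind n L) := by
  induction L generalizing d with
  | nil => simp [aDirectFind]
  | cons p rest ih =>
    obtain ⟨leader, info⟩ := p
    rw [List.foldl_cons, ih]
    by_cases h : normalizeName leader = n
    · simp only [aDirectFind, h, PySem.Dict.get?_setdefault_self]
      cases d.get? n <;> simp
    · simp only [aDirectFind, if_neg (show ¬ (normalizeName leader == n) = true by simp [h]),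
        PySem.Dict.get?_setdefault_of_ne _ _ (Ne.symm h)]

theorem variant_inv (L : List (String × String))
    (d : PySem.Dict String (List (String × String))) (n : String) :
    (L.foldl (fun d p =>
      match (PySem.Dict.mk leadershipTable).get? p.2 with
      | some info => d.setdefault p.1 (("name", p.2) :: info)
      | none => d) d).get? n
      = (d.get? n).or (aVariantFind n L) := by
  induction L generalizing d with
  | nil => simp [aVariantFind]
  | cons p rest ih =>
    obtain ⟨v, c⟩ := p
    rw [List.foldl_cons]
    cases hc : (PySem.Dict.mk leadershipTable).get? c with
    | none => simp only [hc, ih, aVariantFind]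
    | some info =>
      simp only [hc, ih, aVariantFind]
      by_cases h : v = n
      · simp only [h, PySem.Dict.get?_setdefault_self]
        cases d.get? n <;> simp
      · simp only [if_neg (show ¬ (v == n) = true by simp [h]),
          PySem.Dict.get?_setdefault_of_ne _ _ (Ne.symm h)]

theorem partial_inv (L : List (String × List (String × String)))
    (d : PySem.Dict (String × Option Char) (List (String × String))) (key : String × Option Char) :
    (L.foldl (fun d p =>
      let parts := PySem.Str.split₀ (PySem.Str.lower p.1)
      if 2 ≤ parts.length then
        d.setdefault (PySem.List.pyGetD parts (-1) "", PySem.Str.pyGet? (PySem.List.pyGetD parts 0 "") 0)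
          (("name", p.1) :: p.2)
      else d) d).get? key
      = (d.get? key).or (aPartialFindKey key L) := by
  induction L generalizing d with
  | nil => rw [List.foldl_nil, show aPartialFindKey key [] = none from rfl, Option.or_none]
  | cons p rest ih =>
    obtain ⟨leader, info⟩ := p
    rw [List.foldl_cons, ih]
    rw [show (let parts := PySem.Str.split₀ (PySem.Str.lower (leader, info).1)
        if 2 ≤ parts.length then
          d.setdefault (PySem.List.pyGetD parts (-1) "", PySem.Str.pyGet? (PySem.List.pyGetD parts 0 "") 0)
            (("name", (leader, info).1) :: (leader, info).2)
        else d) =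
        (if 2 ≤ (PySem.Str.split₀ (PySem.Str.lower leader)).length then
          d.setdefault (PySem.List.pyGetD (PySem.Str.split₀ (PySem.Str.lower leader)) (-1) "",
            PySem.Str.pyGet? (PySem.List.pyGetD (PySem.Str.split₀ (PySem.Str.lower leader)) 0 "") 0) (("name", leader) :: info)
        else d) from rfl]
    rw [show aPartialFindKey key ((leader, info) :: rest) =
        (if 2 ≤ (PySem.Str.split₀ (PySem.Str.lower leader)).length then
          (if ((PySem.List.pyGetD (PySem.Str.split₀ (PySem.Str.lower leader)) (-1) "",
            PySem.Str.pyGet? (PySem.List.pyGetD (PySem.Str.split₀ (PySem.Str.lower leader)) 0 "") 0) == key) = true then some (("name", leader) :: info)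
           else aPartialFindKey key rest)
        else aPartialFindKey key rest) from rfl]
    by_cases hl : 2 ≤ (PySem.Str.split₀ (PySem.Str.lower leader)).length
    · rw [if_pos hl, if_pos hl]
      by_cases h : (PySem.List.pyGetD (PySem.Str.split₀ (PySem.Str.lower leader)) (-1) "",
            PySem.Str.pyGet? (PySem.List.pyGetD (PySem.Str.split₀ (PySem.Str.lower leader)) 0 "") 0) = key
      · rw [h, PySem.Dict.get?_setdefault_self, if_pos (beq_self_eq_true key)]
        cases d.get? key <;> rfl
      · rw [PySem.Dict.get?_setdefault_of_ne _ _ (Ne.symm h),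
            if_neg (show ¬ ((PySem.List.pyGetD (PySem.Str.split₀ (PySem.Str.lower leader)) (-1) "",
            PySem.Str.pyGet? (PySem.List.pyGetD (PySem.Str.split₀ (PySem.Str.lower leader)) 0 "") 0) == key) = true from fun hb => h (eq_of_beq hb))]
    · rw [if_neg hl, if_neg hl]

-- A's variant phase (lookup + membership test) equals the scan over the literal variant table
theorem variant_closed (n : String) :
    ((PySem.Dict.mk variantTable).get? n).bind (fun c =>
        ((PySem.Dict.mk leadershipTable).get? c).map (fun info => ("name", c) :: info))
      = aVariantFind n variantTable := by
  have e0 : (PySem.Dict.mk leadershipTable).get? "Mike Johnson" = some [("position", "Speaker of the House"), ("chamber", "House"), ("party", "R")] := rfl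
  have e1 : (PySem.Dict.mk leadershipTable).get? "Steve Scalise" = some [("position", "House Majority Leader"), ("chamber", "House"), ("party", "R")] := rfl
  have e2 : (PySem.Dict.mk leadershipTable).get? "Tom Emmer" = some [("position", "House Majority Whip"), ("chamber", "House"), ("party", "R")] := rfl
  have e3 : (PySem.Dict.mk leadershipTable).get? "Katherine Clark" = some [("position", "House Minority Whip"), ("chamber", "House"), ("party", "D")] := rfl
  have e4 : (PySem.Dict.mk leadershipTable).get? "Chuck Schumer" = some [("position", "Senate Minority Leader"), ("chamber", "Senate"), ("party", "D")] := rfl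
  have e5 : (PySem.Dict.mk leadershipTable).get? "Dick Durbin" = some [("position", "Senate Minority Whip"), ("chamber", "Senate"), ("party", "D")] := rfl
  have e6 : (PySem.Dict.mk leadershipTable).get? "Shelley Moore Capito" = some [("position", "Senate Republican Conference Chair"), ("chamber", "Senate"), ("party", "R")] := rfl
  simp only [variantTable, aVariantFind, PySem.Dict.get?_mk_cons, e0, e1, e2, e3, e4, e5, e6]
  by_cases h0 : ("michael johnson" == n) = true
  · simp only [if_pos h0]; rfl
  simp only [if_neg h0]
  by_cases h1 : ("steven scalise" == n) = true
  · simp only [if_pos h1]; rfl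
  simp only [if_neg h1]
  by_cases h2 : ("thomas emmer" == n) = true
  · simp only [if_pos h2]; rfl
  simp only [if_neg h2]
  by_cases h3 : ("katherine m clark" == n) = true
  · simp only [if_pos h3]; rfl
  simp only [if_neg h3]
  by_cases h4 : ("katherine m. clark" == n) = true
  · simp only [if_pos h4]; rfl
  simp only [if_neg h4]
  by_cases h5 : ("charles schumer" == n) = true
  · simp only [if_pos h5]; rfl
  simp only [if_neg h5]
  by_cases h6 : ("charles e schumer" == n) = true
  · simp only [if_pos h6]; rfl
  simp only [if_neg h6]
  by_cases h7 : ("richard durbin" == n) = true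
  · simp only [if_pos h7]; rfl
  simp only [if_neg h7]
  by_cases h8 : ("richard j durbin" == n) = true
  · simp only [if_pos h8]; rfl
  simp only [if_neg h8]
  by_cases h9 : ("shelley capito" == n) = true
  · simp only [if_pos h9]; rfl
  simp only [if_neg h9]
  rfl

-- A's partial scan equals: guard the name's shape once, then scan by the extracted key
theorem partial_key (n : String) (L : List (String × List (String × String))) :
    aPartialFind n L
      = (if 2 ≤ (PySem.Str.split₀ n).length then
          aPartialFindKey (PySem.List.pyGetD (PySem.Str.split₀ n) (-1) "",
            PySem.Str.pyGet? (PySem.List.pyGetD (PySem.Str.split₀ n) 0 "") 0) L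
        else none) := by
  induction L with
  | nil => simp [aPartialFind, aPartialFindKey]
  | cons p rest ih =>
    obtain ⟨leader, info⟩ := p
    by_cases hn : 2 ≤ (PySem.Str.split₀ n).length
    · simp only [aPartialFind, aPartialFindKey, if_pos hn] at ih ⊢
      by_cases hl : 2 ≤ (PySem.Str.split₀ (PySem.Str.lower leader)).length
      · simp only [if_pos (And.intro hl hn), if_pos hl, ih, Prod.mk.injEq, beq_iff_eq,
          Bool.and_eq_true]
      · simp only [if_neg (by tauto : ¬ (2 ≤ (PySem.Str.split₀ (PySem.Str.lower leader)).length ∧ 2 ≤ (PySem.Str.split₀ n).length)), if_neg hl, ih]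
    · simp only [aPartialFind, if_neg hn, if_neg (by tauto : ¬ (2 ≤ (PySem.Str.split₀ (PySem.Str.lower leader)).length ∧ 2 ≤ (PySem.Str.split₀ n).length)), ih]

-- ===== VERDICT (by name: the statement is the Claim_ definition above) =====
theorem directIdx_get (n : String) : directIdx.get? n = aDirectFind n leadershipTable := by
  rw [directIdx, direct_inv]; rfl

theorem variantIdx_get (n : String) : variantIdx.get? n = aVariantFind n variantTable := by
  rw [variantIdx, variant_inv]; rfl

theorem partialIdx_get (key : String × Option Char) :
    partialIdx.get? key = aPartialFindKey key leadershipTable := by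
  rw [partialIdx, partial_inv]; rfl

theorem core_eq (n : String) :
    (match aDirectFind n leadershipTable with
     | some r => (true, some r)
     | none =>
       match (PySem.Dict.mk variantTable).get? n with
       | some canonical =>
         match (PySem.Dict.mk leadershipTable).get? canonical with
         | some info => (true, some (("name", canonical) :: info))
         | none =>
           match aPartialFind n leadershipTable with
           | some r => (true, some r)
           | none => (false, none)
       | none =>
         match aPartialFind n leadershipTable with
         | some r => (true, some r)
         | none => (false, none))
    = (match
        (match
          (match directIdx.get? n with
           | some _ => directIdx.get? n
           | none => variantIdx.get? n) with
         | some _ =>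
           (match directIdx.get? n with
            | some _ => directIdx.get? n
            | none => variantIdx.get? n)
         | none =>
           if 2 ≤ (PySem.Str.split₀ n).length then
             partialIdx.get? (PySem.List.pyGetD (PySem.Str.split₀ n) (-1) "",
               PySem.Str.pyGet? (PySem.List.pyGetD (PySem.Str.split₀ n) 0 "") 0)
           else none) with
       | some r => (true, some r)
       | none => (false, none)) := by
  rw [directIdx_get, variantIdx_get, partialIdx_get, partial_key n leadershipTable,
      ← variant_closed n]
  cases hd : aDirectFind n leadershipTable with
  | some r => rfl
  | none =>
    cases hv : (PySem.Dict.mk variantTable).get? n with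
    | none => rfl
    | some c =>
      rw [show ((some c).bind (fun c =>
            ((PySem.Dict.mk leadershipTable).get? c).map (fun info => ("name", c) :: info)))
          = ((PySem.Dict.mk leadershipTable).get? c).map (fun info => ("name", c) :: info) from rfl]
      show (match (PySem.Dict.mk leadershipTable).get? c with
            | some info => (true, some (("name", c) :: info))
            | none =>
              match (if 2 ≤ (PySem.Str.split₀ n).length then
                  aPartialFindKey (PySem.List.pyGetD (PySem.Str.split₀ n) (-1) "",
                    PySem.Str.pyGet? (PySem.List.pyGetD (PySem.Str.split₀ n) 0 "") 0) leadershipTable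
                else none) with
              | some r => (true, some r)
              | none => (false, none)) = _
      cases (PySem.Dict.mk leadershipTable).get? c <;> rfl

set_option maxRecDepth 32768 in
theorem is_leadership_member_spec : Claim_equal_is_leadership_member := by
  intro s _
  show is_leadership_member s = is_leadership_member_alt s
  rw [is_leadership_member, is_leadership_member_alt]
  by_cases hs : (s == "") = true
  · rw [if_pos hs, if_pos hs]
  · rw [if_neg hs, if_neg hs]
    exact core_eq (normalizeName s)
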